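-- pv_equiv track=rewrite | github.com/COS30019-Assignment2-group2/search-strategy- | Nodes_GBFS.py | dfs
-- ===== SOURCE A (Python) =====
-- def dfs(nodes, edges, origin, destination):
--     stack = [(origin, [origin])]
--     visited = set()
--
--     while stack:
--         node, path = stack.pop()
--         if node == destination:
--             return path
--         if node not in visited:
--             visited.add(node)
--             for neighbor in sorted([end for start, end in edges if start == node]):
--                 stack.append((neighbor, path + [neighbor]))
--
--     return None
-- ===== SOURCE B (Python) =====
-- def dfs(nodes, edges, origin, destination):
--     adj = {}
--     for start, end in edges:
--         adj.setdefault(start, []).append(end)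
--     for v in adj.values():
--         v.sort()
--     if origin == destination:
--         return [origin]
--     visited = {origin}
--     path = [origin]
--     frames = [list(adj.get(origin, []))]
--     while frames:
--         rem = frames[-1]
--         if not rem:
--             frames.pop()
--             path.pop()
--             continue
--         nb = rem.pop()
--         if nb == destination:
--             return path + [nb]
--         if nb not in visited:
--             visited.add(nb)
--             path.append(nb)
--             frames.append(list(adj.get(nb, [])))
--     return None
-- ===== Notes on version B (the rewrite author's own statement) =====
-- stated objective: alternative
-- what changed: B precomputes a sorted adjacency dict once and runs the DFS with a stack of per-node neighbour frames beside one explicit current path, instead of A's stack of (node, copied path) pairs that rescans and re-sorts the whole edge list at every expansion.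
import Mathlib
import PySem

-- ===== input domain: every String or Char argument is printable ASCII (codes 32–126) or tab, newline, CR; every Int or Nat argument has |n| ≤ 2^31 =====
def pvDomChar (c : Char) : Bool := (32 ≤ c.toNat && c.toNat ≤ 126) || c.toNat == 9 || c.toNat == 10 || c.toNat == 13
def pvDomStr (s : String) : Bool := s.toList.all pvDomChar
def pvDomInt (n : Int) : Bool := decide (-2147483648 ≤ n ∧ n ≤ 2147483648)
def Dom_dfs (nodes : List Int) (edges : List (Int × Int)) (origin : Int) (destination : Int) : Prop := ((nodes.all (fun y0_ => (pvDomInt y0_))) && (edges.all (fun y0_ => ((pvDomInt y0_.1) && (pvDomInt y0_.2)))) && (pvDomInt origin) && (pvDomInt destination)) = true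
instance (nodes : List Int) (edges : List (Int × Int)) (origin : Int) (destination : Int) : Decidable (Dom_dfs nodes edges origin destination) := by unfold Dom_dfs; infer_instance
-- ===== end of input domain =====

-- B replaces A's stack of (node, copied-path) pairs — which rescans and re-sorts the whole edge
-- list at every expansion — by a precomputed sorted adjacency dict and a stack of neighbour
-- frames beside ONE explicit current path; same return value. Both loop ports carry a Nat fuel
-- parameter as a totality guard only (the fuel supplied is proved sufficient below).

-- ===== PORT A =====
-- sorted([end for start, end in edges if start == node])
def neighborsA (edges : List (Int × Int)) (node : Int) : List Int :=
  PySem.List.sorted ((edges.filter (fun p => p.1 == node)).map Prod.snd) (fun x => x) false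

-- the while-loop of A; the stack top is the list head (Python appends/pops at the end)
def dfsLoop (edges : List (Int × Int)) (destination : Int) :
    Nat → List (Int × List Int) → PySem.Set Int → Option (List Int)
  | 0, _, _ => none  -- fuel guard, never reached (fuel adequacy is proved below)
  | _ + 1, [], _ => none
  | fuel + 1, (node, path) :: rest, visited =>
    if node = destination then some path
    else if PySem.Set.contains visited node then dfsLoop edges destination fuel rest visited
    else
      dfsLoop edges destination fuel
        ((neighborsA edges node).foldl (fun st nb => (nb, path ++ [nb]) :: st) rest)
        (PySem.Set.add visited node)

def dfs (nodes : List Int) (edges : List (Int × Int)) (origin : Int) (destination : Int) :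
    Option (List Int) :=
  dfsLoop edges destination ((edges.length + 1) * (edges.length + 1) + 2)
    [(origin, [origin])] PySem.Set.empty

-- ===== PORT B =====
-- adj = {}; for start, end in edges: adj.setdefault(start, []).append(end)
def buildAdj (edges : List (Int × Int)) : PySem.Dict Int (List Int) :=
  edges.foldl (fun d p => d.modify p.1 [] (fun v => v ++ [p.2])) PySem.Dict.empty

-- for v in adj.values(): v.sort()   (in-place ascending sort of every value)
def sortVals (d : PySem.Dict Int (List Int)) : PySem.Dict Int (List Int) :=
  PySem.Dict.mk (d.items.map (fun p => (p.1, PySem.List.sorted p.2 (fun x => x) false)))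

-- the while-loop of B: `frames` holds, per open node, its not-yet-tried neighbours (ascending,
-- Python pops the largest from the end = getLast), `path` is the single current path
def dfsAltLoop (adj : PySem.Dict Int (List Int)) (destination : Int) :
    Nat → List (List Int) → List Int → PySem.Set Int → Option (List Int)
  | 0, _, _, _ => none  -- fuel guard, never reached (fuel adequacy is proved below)
  | _ + 1, [], _, _ => none
  | fuel + 1, rem :: fr, path, visited =>
    if hrem : rem = [] then  -- if not rem: frames.pop(); path.pop(); continue
      dfsAltLoop adj destination fuel fr path.dropLast visited
    else
      let nb := rem.getLast hrem  -- nb = rem.pop()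
      if nb = destination then some (path ++ [nb])
      else if PySem.Set.contains visited nb then
        dfsAltLoop adj destination fuel (rem.dropLast :: fr) path visited
      else
        dfsAltLoop adj destination fuel ((adj.getD nb []) :: rem.dropLast :: fr)
          (path ++ [nb]) (PySem.Set.add visited nb)

def pvFuelB (adj : PySem.Dict Int (List Int)) : Nat :=
  2 * (adj.values.flatten.length + 1) * (adj.values.flatten.length + 1) + 2

def dfs_alt (nodes : List Int) (edges : List (Int × Int)) (origin : Int) (destination : Int) :
    Option (List Int) :=
  if origin = destination then some [origin]
  else
    dfsAltLoop (sortVals (buildAdj edges)) destination (pvFuelB (sortVals (buildAdj edges)))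
      [(sortVals (buildAdj edges)).getD origin []] [origin]
      (PySem.Set.add PySem.Set.empty origin)

-- ===== PRECONDITION & SPEC =====
def Spec_dfs (nodes : List Int) (edges : List (Int × Int)) (origin : Int) (destination : Int) (out : Option (List Int)) : Prop := out = dfs_alt nodes edges origin destination
instance (nodes : List Int) (edges : List (Int × Int)) (origin : Int) (destination : Int) (out : Option (List Int)) : Decidable (Spec_dfs nodes edges origin destination out) := by unfold Spec_dfs; infer_instance

-- ===== CLAIM (what is proved, stated in full; the proofs are below) =====
def Claim_equal_dfs : Prop := ∀ (nodes : List Int) (edges : List (Int × Int)) (origin : Int) (destination : Int), Dom_dfs nodes edges origin destination → Spec_dfs nodes edges origin destination (dfs nodes edges origin destination)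

-- ===== LEMMAS AND PROOFS =====

-- ── termination bookkeeping shared by both loops (measure only, not part of the computation) ──

-- number of not-yet-visited values in a pool list
def pvCnt (pool : List Int) (visited : PySem.Set Int) : Nat :=
  ((PySem.List.dedup pool).filter (fun x => !(PySem.Set.contains visited x))).length

-- A's pool: everything on the stack plus every edge target
def pvUnvis (stack : List (Int × List Int)) (pool : List Int) (visited : PySem.Set Int) : Nat :=
  pvCnt (stack.map Prod.fst ++ pool) visited

theorem pvNodupSubsetLen {l l2 : List Int} (h : l.Nodup) (hs : l ⊆ l2) : l.length ≤ l2.length := by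
  calc l.length = l.toFinset.card := (List.toFinset_card_of_nodup h).symm
    _ ≤ l2.toFinset.card := Finset.card_le_card (fun x hx => by
        simp only [List.mem_toFinset] at hx ⊢; exact hs hx)
    _ ≤ l2.length := l2.toFinset_card_le

theorem pvFilterNeLt (l : List Int) (b : Int) (hb : b ∈ l) :
    (l.filter (fun a => decide (a ≠ b))).length < l.length := by
  induction l with
  | nil => cases hb
  | cons x xs ih =>
    by_cases hx : x = b
    · subst hx
      simp only [List.filter_cons, ne_eq, not_true_eq_false, decide_false,
        List.length_cons]
      exact Nat.lt_succ_of_le (List.length_filter_le _ _)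
    · have hb' : b ∈ xs := by cases hb with
        | head => exact absurd rfl hx
        | tail _ h => exact h
      simp only [List.filter_cons, hx, ne_eq, not_false_eq_true, decide_true,
        if_true, List.length_cons]
      simpa using Nat.succ_lt_succ (ih hb')

theorem pvCntLe {xs ys : List Int} {p q : Int → Bool}
    (h : ∀ a, a ∈ xs → p a = true → a ∈ ys ∧ q a = true) :
    ((PySem.List.dedup xs).filter p).length ≤ ((PySem.List.dedup ys).filter q).length := by
  apply pvNodupSubsetLen ((PySem.List.nodup_dedup xs).filter p)
  intro a ha
  simp only [List.mem_filter, PySem.List.mem_dedup] at ha ⊢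
  exact h a ha.1 ha.2

theorem pvCntLt {xs ys : List Int} {p q : Int → Bool} (b : Int)
    (h : ∀ a, a ∈ xs → p a = true → (a ∈ ys ∧ q a = true) ∧ a ≠ b)
    (hb : b ∈ ys) (hqb : q b = true) :
    ((PySem.List.dedup xs).filter p).length < ((PySem.List.dedup ys).filter q).length := by
  have h1 : ((PySem.List.dedup xs).filter p).length
      ≤ (((PySem.List.dedup ys).filter q).filter (fun a => decide (a ≠ b))).length := by
    apply pvNodupSubsetLen ((PySem.List.nodup_dedup xs).filter p)
    intro a ha
    simp only [List.mem_filter, PySem.List.mem_dedup] at ha ⊢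
    exact ⟨⟨(h a ha.1 ha.2).1.1, (h a ha.1 ha.2).1.2⟩, by simpa using (h a ha.1 ha.2).2⟩
  have h2 : (((PySem.List.dedup ys).filter q).filter (fun a => decide (a ≠ b))).length
      < ((PySem.List.dedup ys).filter q).length := by
    apply pvFilterNeLt
    simp only [List.mem_filter, PySem.List.mem_dedup]
    exact ⟨hb, hqb⟩
  exact lt_of_le_of_lt h1 h2

-- pushing the sorted neighbours one by one onto the head of the stack (A's for-loop)
theorem pvPushEq (nbrs path : List Int) (rest : List (Int × List Int)) :
    nbrs.foldl (fun st nb => (nb, path ++ [nb]) :: st) rest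
      = (nbrs.reverse.map (fun nb => (nb, path ++ [nb]))) ++ rest := by
  induction nbrs generalizing rest with
  | nil => simp
  | cons x xs ih => simp [ih]

-- a dict value looked up with default [] is a sublist of all values flattened
theorem pvGetDSubFlatten (adj : PySem.Dict Int (List Int)) (k : Int) :
    (adj.getD k []).Sublist adj.values.flatten := by
  rw [PySem.Dict.getD_eq_get?_getD]
  cases hg : adj.get? k with
  | none => simp
  | some v =>
    have hv : v ∈ adj.values := by
      have := PySem.Dict.mem_items_of_get?_eq_some adj hg
      simp only [PySem.Dict.values, List.mem_map]
      exact ⟨(k, v), this, rfl⟩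
    simpa using List.sublist_flatten_of_mem hv

-- decreasing lemmas for the ports' loops (cited by name from their decreasing_by blocks)
theorem pvDecA_skip (edges : List (Int × Int)) (node : Int) (path : List Int)
    (rest : List (Int × List Int)) (visited : PySem.Set Int) :
    (edges.length + 1) * pvUnvis rest (edges.map Prod.snd) visited + rest.length
      < (edges.length + 1) * pvUnvis ((node, path) :: rest) (edges.map Prod.snd) visited
          + ((node, path) :: rest).length := by
  have hle : pvUnvis rest (edges.map Prod.snd) visited
      ≤ pvUnvis ((node, path) :: rest) (edges.map Prod.snd) visited := by
    apply pvCntLe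
    intro a ha hp
    exact ⟨by simp only [List.map_cons, List.cons_append, List.mem_cons]; right; exact ha, hp⟩
  have := Nat.mul_le_mul_left (edges.length + 1) hle
  simp only [List.length_cons]
  omega

theorem pvDecA_push (edges : List (Int × Int)) (node : Int) (path : List Int)
    (rest : List (Int × List Int)) (visited : PySem.Set Int)
    (hvis : ¬ PySem.Set.contains visited node = true) :
    (edges.length + 1) * pvUnvis ((neighborsA edges node).foldl
          (fun st nb => (nb, path ++ [nb]) :: st) rest) (edges.map Prod.snd)
          (PySem.Set.add visited node)
        + ((neighborsA edges node).foldl (fun st nb => (nb, path ++ [nb]) :: st) rest).length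
      < (edges.length + 1) * pvUnvis ((node, path) :: rest) (edges.map Prod.snd) visited
          + ((node, path) :: rest).length := by
  rw [pvPushEq]
  have hnl : (neighborsA edges node).length ≤ edges.length := by
    rw [neighborsA, PySem.List.length_sorted, List.length_map]
    exact List.length_filter_le _ _
  have hlt : pvUnvis (((neighborsA edges node).reverse.map (fun nb => (nb, path ++ [nb]))) ++ rest)
        (edges.map Prod.snd) (PySem.Set.add visited node)
      < pvUnvis ((node, path) :: rest) (edges.map Prod.snd) visited := by
    apply pvCntLt node
    · intro a ha hp
      simp only [PySem.Set.contains_eq_listContains, List.contains_eq_mem, PySem.Set.mem_add,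
        Bool.decide_or, Bool.not_or, Bool.and_eq_true, Bool.not_eq_eq_eq_not, Bool.not_true,
        decide_eq_false_iff_not] at hp
      obtain ⟨hnv1, hnv2⟩ := hp
      refine ⟨⟨?_, by simp [hnv1]⟩, hnv2⟩
      simp only [List.map_append, List.map_map, List.mem_append, List.mem_map,
        Function.comp_def, List.mem_reverse, neighborsA, PySem.List.mem_sorted,
        List.map_cons, List.cons_append, List.mem_cons] at ha ⊢
      rcases ha with (⟨nb, hnb, rfl⟩ | h) | h
      · rcases hnb with ⟨pr, hpr, rfl⟩
        exact Or.inr (Or.inr ⟨pr, List.mem_of_mem_filter hpr, rfl⟩)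
      · exact Or.inr (Or.inl h)
      · exact Or.inr (Or.inr h)
    · simp
    · simpa [PySem.Set.contains_iff] using hvis
  have := Nat.mul_le_mul_left (edges.length + 1) (Nat.succ_le_of_lt hlt)
  simp only [List.length_append, List.length_map, List.length_reverse, List.length_cons,
    Nat.mul_succ] at this ⊢
  omega

theorem pvDecB_pop (adj : PySem.Dict Int (List Int)) (rem : List Int) (fr : List (List Int))
    (visited : PySem.Set Int) (hrem : rem = []) :
    (adj.values.flatten.length + 1) * pvCnt (fr.flatten ++ adj.values.flatten) visited
        + (fr.flatten.length + fr.length)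
      < (adj.values.flatten.length + 1) * pvCnt ((rem :: fr).flatten ++ adj.values.flatten) visited
          + ((rem :: fr).flatten.length + (rem :: fr).length) := by
  subst hrem
  simp only [List.flatten_cons, List.nil_append, List.length_cons]
  omega

theorem pvDecB_skip (adj : PySem.Dict Int (List Int)) (rem : List Int) (fr : List (List Int))
    (visited : PySem.Set Int) (hrem : ¬ rem = []) :
    (adj.values.flatten.length + 1)
          * pvCnt ((rem.dropLast :: fr).flatten ++ adj.values.flatten) visited
        + ((rem.dropLast :: fr).flatten.length + (rem.dropLast :: fr).length)
      < (adj.values.flatten.length + 1) * pvCnt ((rem :: fr).flatten ++ adj.values.flatten) visited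
          + ((rem :: fr).flatten.length + (rem :: fr).length) := by
  have hle : pvCnt (rem.dropLast ++ (fr.flatten ++ adj.values.flatten)) visited
      ≤ pvCnt (rem ++ (fr.flatten ++ adj.values.flatten)) visited := by
    apply pvCntLe
    intro a ha hp
    refine ⟨?_, hp⟩
    simp only [List.mem_append] at ha ⊢
    rcases ha with h | h
    · exact Or.inl (List.mem_of_mem_dropLast h)
    · exact Or.inr h
  have hlen : rem.dropLast.length + 1 = rem.length := by
    simp [List.length_dropLast, Nat.sub_add_cancel (List.length_pos_of_ne_nil hrem)]
  have := Nat.mul_le_mul_left (adj.values.flatten.length + 1) hle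
  simp only [List.flatten_cons, List.append_assoc, List.length_append, List.length_cons]
  omega

theorem pvDecB_push (adj : PySem.Dict Int (List Int)) (rem : List Int) (fr : List (List Int))
    (visited : PySem.Set Int) (hrem : ¬ rem = [])
    (hvis : ¬ PySem.Set.contains visited (rem.getLast hrem) = true) :
    (adj.values.flatten.length + 1)
          * pvCnt (((adj.getD (rem.getLast hrem) []) :: rem.dropLast :: fr).flatten
              ++ adj.values.flatten) (PySem.Set.add visited (rem.getLast hrem))
        + (((adj.getD (rem.getLast hrem) []) :: rem.dropLast :: fr).flatten.length
            + ((adj.getD (rem.getLast hrem) []) :: rem.dropLast :: fr).length)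
      < (adj.values.flatten.length + 1) * pvCnt ((rem :: fr).flatten ++ adj.values.flatten) visited
          + ((rem :: fr).flatten.length + (rem :: fr).length) := by
  have hnb : rem.getLast hrem ∈ rem := List.getLast_mem hrem
  have hlt : pvCnt (adj.getD (rem.getLast hrem) []
          ++ (rem.dropLast ++ (fr.flatten ++ adj.values.flatten)))
        (PySem.Set.add visited (rem.getLast hrem))
      < pvCnt (rem ++ (fr.flatten ++ adj.values.flatten)) visited := by
    apply pvCntLt (rem.getLast hrem)
    · intro a ha hp
      simp only [PySem.Set.contains_eq_listContains, List.contains_eq_mem, PySem.Set.mem_add,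
        Bool.decide_or, Bool.not_or, Bool.and_eq_true, Bool.not_eq_eq_eq_not, Bool.not_true,
        decide_eq_false_iff_not] at hp
      obtain ⟨hnv1, hnv2⟩ := hp
      refine ⟨⟨?_, by simp [hnv1]⟩, hnv2⟩
      simp only [List.mem_append] at ha ⊢
      rcases ha with h | h | h
      · exact Or.inr (Or.inr ((pvGetDSubFlatten adj _).subset h))
      · exact Or.inl (List.mem_of_mem_dropLast h)
      · exact Or.inr h
    · simp only [List.mem_append]
      exact Or.inl hnb
    · simpa [PySem.Set.contains_iff] using hvis
  have hnl : (adj.getD (rem.getLast hrem) []).length ≤ adj.values.flatten.length :=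
    (pvGetDSubFlatten adj _).length_le
  have hlen : rem.dropLast.length + 1 = rem.length := by
    simp [List.length_dropLast, Nat.sub_add_cancel (List.length_pos_of_ne_nil hrem)]
  have := Nat.mul_le_mul_left (adj.values.flatten.length + 1) (Nat.succ_le_of_lt hlt)
  simp only [List.flatten_cons, List.append_assoc, List.length_append, List.length_cons,
    Nat.mul_succ] at this ⊢
  omega

-- the fuel-free versions of the two loops (proof-side only), by well-founded recursion on the
-- number of unvisited pool values; each port is shown to equal its fuel-free version once the
-- fuel exceeds the measure
def dfsLoopW (edges : List (Int × Int)) (destination : Int) :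
    List (Int × List Int) → PySem.Set Int → Option (List Int)
  | [], _ => none
  | (node, path) :: rest, visited =>
    if node = destination then some path
    else if PySem.Set.contains visited node then dfsLoopW edges destination rest visited
    else
      dfsLoopW edges destination
        ((neighborsA edges node).foldl (fun st nb => (nb, path ++ [nb]) :: st) rest)
        (PySem.Set.add visited node)
termination_by stack visited =>
  (edges.length + 1) * pvUnvis stack (edges.map Prod.snd) visited + stack.length
decreasing_by
  · exact pvDecA_skip edges node path rest visited
  · rename_i _ hvis
    exact pvDecA_push edges node path rest visited hvis

def dfsAltLoopW (adj : PySem.Dict Int (List Int)) (destination : Int) :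
    List (List Int) → List Int → PySem.Set Int → Option (List Int)
  | [], _, _ => none
  | rem :: fr, path, visited =>
    if hrem : rem = [] then
      dfsAltLoopW adj destination fr path.dropLast visited
    else
      let nb := rem.getLast hrem
      if nb = destination then some (path ++ [nb])
      else if PySem.Set.contains visited nb then
        dfsAltLoopW adj destination (rem.dropLast :: fr) path visited
      else
        dfsAltLoopW adj destination ((adj.getD nb []) :: rem.dropLast :: fr)
          (path ++ [nb]) (PySem.Set.add visited nb)
termination_by frames path visited =>
  (adj.values.flatten.length + 1) * pvCnt (frames.flatten ++ adj.values.flatten) visited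
    + (frames.flatten.length + frames.length)
decreasing_by
  · exact pvDecB_pop adj rem fr visited hrem
  · exact pvDecB_skip adj rem fr visited hrem
  · rename_i hvis
    exact pvDecB_push adj rem fr visited hrem hvis

-- with enough fuel the fuelled ports compute their fuel-free versions
theorem dfsLoop_adequate (edges : List (Int × Int)) (destination : Int) :
    ∀ (fuel : Nat) (stack : List (Int × List Int)) (visited : PySem.Set Int),
      (edges.length + 1) * pvUnvis stack (edges.map Prod.snd) visited + stack.length < fuel →
      dfsLoop edges destination fuel stack visited = dfsLoopW edges destination stack visited := by
  intro fuel
  induction fuel with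
  | zero => intro stack visited h; exact absurd h (Nat.not_lt_zero _)
  | succ f ih =>
    intro stack visited h
    match stack with
    | [] => rw [dfsLoop, dfsLoopW]
    | (node, path) :: rest =>
      rw [dfsLoop, dfsLoopW]
      by_cases hdest : node = destination
      · rw [if_pos hdest, if_pos hdest]
      · rw [if_neg hdest, if_neg hdest]
        by_cases hvis : PySem.Set.contains visited node = true
        · rw [if_pos hvis, if_pos hvis]
          exact ih rest visited
            (by have := pvDecA_skip edges node path rest visited; omega)
        · rw [if_neg hvis, if_neg hvis]
          exact ih _ _
            (by have := pvDecA_push edges node path rest visited hvis; omega)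

theorem dfsAltLoop_adequate (adj : PySem.Dict Int (List Int)) (destination : Int) :
    ∀ (fuel : Nat) (frames : List (List Int)) (path : List Int) (visited : PySem.Set Int),
      (adj.values.flatten.length + 1) * pvCnt (frames.flatten ++ adj.values.flatten) visited
          + (frames.flatten.length + frames.length) < fuel →
      dfsAltLoop adj destination fuel frames path visited
        = dfsAltLoopW adj destination frames path visited := by
  intro fuel
  induction fuel with
  | zero => intro frames path visited h; exact absurd h (Nat.not_lt_zero _)
  | succ f ih =>
    intro frames path visited h
    match frames with
    | [] => rw [dfsAltLoop, dfsAltLoopW]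
    | rem :: fr =>
      rw [dfsAltLoop, dfsAltLoopW]
      by_cases hrem : rem = []
      · rw [dif_pos hrem, dif_pos hrem]
        exact ih fr path.dropLast visited
          (by have := pvDecB_pop adj rem fr visited hrem; omega)
      · rw [dif_neg hrem, dif_neg hrem]
        by_cases hdest : rem.getLast hrem = destination
        · rw [if_pos hdest, if_pos hdest]
        · rw [if_neg hdest, if_neg hdest]
          by_cases hvis : PySem.Set.contains visited (rem.getLast hrem) = true
          · rw [if_pos hvis, if_pos hvis]
            exact ih _ _ _
              (by have := pvDecB_skip adj rem fr visited hrem; omega)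
          · rw [if_neg hvis, if_neg hvis]
            exact ih _ _ _
              (by have := pvDecB_push adj rem fr visited hrem hvis; omega)

-- a pool count is at most the pool length
theorem pvCnt_le (xs : List Int) (v : PySem.Set Int) : pvCnt xs v ≤ xs.length := by
  refine le_trans (List.length_filter_le _ _) ?_
  exact pvNodupSubsetLen (PySem.List.nodup_dedup xs)
    (fun a ha => (PySem.List.mem_dedup _ _).mp ha)

theorem get?_sortVals (d : PySem.Dict Int (List Int)) (k : Int) :
    (sortVals d).get? k = (d.get? k).map (fun v => PySem.List.sorted v (fun x => x) false) := by
  obtain ⟨l⟩ := d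
  induction l with
  | nil => simp [sortVals, PySem.Dict.get?]
  | cons p rest ih =>
    obtain ⟨a, b⟩ := p
    show (PySem.Dict.mk (((a, b) :: rest).map _)).get? k = _
    rw [List.map_cons]
    rw [PySem.Dict.get?_mk_cons, PySem.Dict.get?_mk_cons]
    split
    · rfl
    · exact ih

theorem getD_sortVals (d : PySem.Dict Int (List Int)) (k : Int) :
    (sortVals d).getD k [] = PySem.List.sorted (d.getD k []) (fun x => x) false := by
  rw [PySem.Dict.getD_eq_get?_getD, PySem.Dict.getD_eq_get?_getD, get?_sortVals]
  cases d.get? k with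
  | none => simp [PySem.List.sorted]
  | some v => rfl

theorem adj_getD (edges : List (Int × Int)) (node : Int) :
    (sortVals (buildAdj edges)).getD node [] = neighborsA edges node := by
  rw [getD_sortVals, neighborsA]
  unfold buildAdj
  rw [PySem.Dict.getD_foldl_modify_append]
  simp [PySem.Dict.getD_empty]

-- the A-stack encoded by B's frames + current path: frame i's remaining neighbours (top of the
-- frame stack first, each frame reversed since Python pops from the end) paired with the
-- corresponding path prefix
def toStack : List (List Int) → List Int → List (Int × List Int)
  | [], _ => []
  | rem :: fr, path =>
    rem.reverse.map (fun nb => (nb, path ++ [nb])) ++ toStack fr path.dropLast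

theorem loop_eq (edges : List (Int × Int)) (destination : Int)
    (frames : List (List Int)) (path : List Int) (visited : PySem.Set Int) :
    dfsLoopW edges destination (toStack frames path) visited
      = dfsAltLoopW (sortVals (buildAdj edges)) destination frames path visited := by
  induction frames, path, visited using
      dfsAltLoopW.induct (sortVals (buildAdj edges)) destination with
  | case1 path visited =>
    rw [toStack, dfsLoopW, dfsAltLoopW]
  | case2 fr path visited ih =>
    rw [dfsAltLoopW, dif_pos rfl, ← ih, toStack]
    simp
  | case3 rem fr path visited h nb hdest =>
    have hr : rem.reverse = rem.getLast h :: rem.dropLast.reverse := by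
      conv_lhs => rw [← List.dropLast_append_getLast h]
      simp
    rw [dfsAltLoopW, dif_neg h, toStack, hr]
    simp only [List.map_cons, List.cons_append]
    rw [dfsLoopW, if_pos hdest, if_pos hdest]
  | case4 rem fr path visited h nb hdest hvis ih =>
    have hr : rem.reverse = rem.getLast h :: rem.dropLast.reverse := by
      conv_lhs => rw [← List.dropLast_append_getLast h]
      simp
    rw [dfsAltLoopW, dif_neg h, toStack, hr]
    simp only [List.map_cons, List.cons_append]
    rw [dfsLoopW, if_neg hdest, if_neg hdest, if_pos hvis, if_pos hvis, ← ih, toStack]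
  | case5 rem fr path visited h nb hdest hvis ih =>
    have hr : rem.reverse = rem.getLast h :: rem.dropLast.reverse := by
      conv_lhs => rw [← List.dropLast_append_getLast h]
      simp
    rw [dfsAltLoopW, dif_neg h, toStack, hr]
    simp only [List.map_cons, List.cons_append]
    rw [dfsLoopW, if_neg hdest, if_neg hdest, if_neg hvis, if_neg hvis, pvPushEq, ← ih]
    simp only [toStack, adj_getD, List.dropLast_concat, List.append_assoc]
    rfl

-- ===== VERDICT (by name: the statement is the Claim_ definition above) =====
theorem dfs_spec : Claim_equal_dfs := by
  intro nodes edges origin destination _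
  unfold Spec_dfs dfs dfs_alt
  have hbA : (edges.length + 1)
        * pvUnvis [(origin, [origin])] (edges.map Prod.snd) PySem.Set.empty
        + ([(origin, [origin])] : List (Int × List Int)).length
      < (edges.length + 1) * (edges.length + 1) + 2 := by
    have h1 : pvUnvis [(origin, [origin])] (edges.map Prod.snd) PySem.Set.empty
        ≤ edges.length + 1 := by
      have := pvCnt_le (([(origin, [origin])] : List (Int × List Int)).map Prod.fst
        ++ edges.map Prod.snd) PySem.Set.empty
      simpa [pvUnvis] using this
    have h2 := Nat.mul_le_mul_left (edges.length + 1) h1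
    simp only [List.length_cons, List.length_nil]
    omega
  rw [dfsLoop_adequate edges destination _ _ _ hbA]
  rw [dfsLoopW]
  by_cases hod : origin = destination
  · simp [hod]
  · have hbB : ((sortVals (buildAdj edges)).values.flatten.length + 1)
          * pvCnt (([(sortVals (buildAdj edges)).getD origin []] : List (List Int)).flatten
              ++ (sortVals (buildAdj edges)).values.flatten)
            (PySem.Set.add PySem.Set.empty origin)
          + (([(sortVals (buildAdj edges)).getD origin []] : List (List Int)).flatten.length
              + ([(sortVals (buildAdj edges)).getD origin []] : List (List Int)).length)
        < pvFuelB (sortVals (buildAdj edges)) := by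
      have hr0 : ((sortVals (buildAdj edges)).getD origin []).length
          ≤ (sortVals (buildAdj edges)).values.flatten.length :=
        (pvGetDSubFlatten (sortVals (buildAdj edges)) origin).length_le
      have h1 := pvCnt_le (([(sortVals (buildAdj edges)).getD origin []] : List (List Int)).flatten
        ++ (sortVals (buildAdj edges)).values.flatten) (PySem.Set.add PySem.Set.empty origin)
      have h2 : (([(sortVals (buildAdj edges)).getD origin []] : List (List Int)).flatten
            ++ (sortVals (buildAdj edges)).values.flatten).length
          ≤ 2 * (sortVals (buildAdj edges)).values.flatten.length := by
        simp only [List.flatten_cons, List.flatten_nil, List.append_nil, List.length_append]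
        omega
      have h3 := Nat.mul_le_mul_left ((sortVals (buildAdj edges)).values.flatten.length + 1)
        (le_trans h1 h2)
      have h4 : ((sortVals (buildAdj edges)).values.flatten.length + 1)
            * (2 * (sortVals (buildAdj edges)).values.flatten.length + 2)
          = ((sortVals (buildAdj edges)).values.flatten.length + 1)
            * (2 * (sortVals (buildAdj edges)).values.flatten.length)
            + ((sortVals (buildAdj edges)).values.flatten.length + 1) * 2 := by ring
      have h5 : pvFuelB (sortVals (buildAdj edges))
          = ((sortVals (buildAdj edges)).values.flatten.length + 1)
            * (2 * (sortVals (buildAdj edges)).values.flatten.length + 2) + 2 := by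
        unfold pvFuelB; ring
      simp only [List.flatten_cons, List.flatten_nil, List.append_nil, List.length_cons,
        List.length_nil] at h1 h3 ⊢
      omega
    rw [if_neg hod,
      if_neg (by simp [PySem.Set.contains_eq_listContains, PySem.Set.empty] :
        ¬(PySem.Set.contains PySem.Set.empty origin = true)),
      pvPushEq, if_neg hod,
      dfsAltLoop_adequate (sortVals (buildAdj edges)) destination _ _ _ _ hbB, adj_getD]
    have hmain := loop_eq edges destination
      [neighborsA edges origin] [origin] (PySem.Set.add PySem.Set.empty origin)
    rw [toStack, toStack] at hmain
    simp only [List.append_nil] at hmain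
    simpa [adj_getD] using hmain
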